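-- pv_equiv track=rewrite | github.com/Joshwa37/Python | centeredsubarray.py | centeredSubarrays
-- ===== SOURCE A (Python) =====
-- def centeredSubarrays(nums):
--     idx=2
--     l=0
--     m=l+idx
--     out=len(nums)
--     suhe=sum(nums[l:m])
--     while(idx<=len(nums)):
--         while(m<=len(nums)):
--             if(l==0):
--                 tot=suhe
--             else:
--                 tot=tot-nums[l-1]
--                 tot+=nums[m-1]
--             if(tot in nums[l:m]):
--                 out+=1
--             m+=1
--             l+=1
--         idx+=1
--         l=0
--         m=l+idx
--         suhe=sum(nums[l:m])
--     return out
-- ===== SOURCE B (Python) =====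
-- def centeredSubarrays(nums):
--     n = len(nums)
--     out = n
--     for l in range(n):
--         seen = {nums[l]}
--         s = nums[l]
--         for r in range(l + 1, n):
--             s += nums[r]
--             seen.add(nums[r])
--             if s in seen:
--                 out += 1
--     return out
-- ===== Notes on version B (the rewrite author's own statement) =====
-- stated objective: faster
-- what changed: B iterates over start indices and grows each window rightward, maintaining a running sum and a set of the window's elements so the membership test is O(1), replacing A's by-length sliding loops that rescan the slice nums[l:m] for membership on every window.
import Mathlib
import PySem

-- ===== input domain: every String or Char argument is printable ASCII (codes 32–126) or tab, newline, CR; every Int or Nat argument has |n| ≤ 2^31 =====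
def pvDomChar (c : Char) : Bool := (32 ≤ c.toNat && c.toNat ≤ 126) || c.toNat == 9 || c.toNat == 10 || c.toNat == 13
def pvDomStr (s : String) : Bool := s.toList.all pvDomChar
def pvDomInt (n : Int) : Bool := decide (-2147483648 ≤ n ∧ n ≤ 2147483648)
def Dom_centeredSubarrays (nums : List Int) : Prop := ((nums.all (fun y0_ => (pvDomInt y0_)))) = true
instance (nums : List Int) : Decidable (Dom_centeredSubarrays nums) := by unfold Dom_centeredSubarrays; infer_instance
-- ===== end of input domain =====

-- B iterates over start indices growing each window rightward with a running sum and a set of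
-- seen elements (O(1) membership), instead of A's by-length sliding windows that rescan the
-- slice for membership; objective: faster (O(n^2) vs O(n^3)).

-- ===== PORT A =====
-- inner 'while m <= len(nums)' loop of A; state (l, m, out, suhe, tot)
def pvInnerA (nums : List Int) (l m out suhe tot : Int) : Int :=
  if _h : m ≤ (nums.length : Int) then
    let tot' := if l = 0 then suhe
      else tot - PySem.List.pyGetD nums (l - 1) 0 + PySem.List.pyGetD nums (m - 1) 0
    let out' := if (PySem.List.slice nums (some l) (some m)).contains tot' then out + 1 else out
    pvInnerA nums (l + 1) (m + 1) out' suhe tot'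
  else out
termination_by ((nums.length : Int) + 1 - m).toNat
decreasing_by omega

-- outer 'while idx <= len(nums)' loop of A (suhe is recomputed for each idx; tot enters as 0,
-- unused until the first l = 0 iteration assigns it, exactly as in the Python)
def pvOuterA (nums : List Int) (idx out : Int) : Int :=
  if _h : idx ≤ (nums.length : Int) then
    let suhe := (PySem.List.slice nums (some 0) (some idx)).sum
    pvOuterA nums (idx + 1) (pvInnerA nums 0 idx out suhe 0)
  else out
termination_by ((nums.length : Int) + 1 - idx).toNat
decreasing_by omega

def centeredSubarrays (nums : List Int) : Int :=
  pvOuterA nums 2 (nums.length : Int)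

-- ===== PORT B =====
-- body of B's inner 'for r in range(l+1, n)' loop; state (out, seen, s)
def pvStepB (nums : List Int) (st : Int × PySem.Set Int × Int) (r : Int) :
    Int × PySem.Set Int × Int :=
  let y := PySem.List.pyGetD nums r 0
  let s' := st.2.2 + y
  let seen' := PySem.Set.add st.2.1 y
  ((if PySem.Set.contains seen' s' then st.1 + 1 else st.1), seen', s')

-- body of B's outer 'for l in range(n)' loop
def pvBodyB (nums : List Int) (out l : Int) : Int :=
  let x := PySem.List.pyGetD nums l 0
  ((PySem.List.pyRange (l + 1) (nums.length : Int) 1).foldl (pvStepB nums)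
    (out, PySem.Set.ofList [x], x)).1

def centeredSubarrays_alt (nums : List Int) : Int :=
  let n : Int := nums.length
  (PySem.List.pyRange 0 n 1).foldl (pvBodyB nums) n

-- ===== PRECONDITION & SPEC =====
def Spec_centeredSubarrays (nums : List Int) (out : Int) : Prop := out = centeredSubarrays_alt nums
instance (nums : List Int) (out : Int) : Decidable (Spec_centeredSubarrays nums out) := by unfold Spec_centeredSubarrays; infer_instance

-- ===== CLAIM (what is proved, stated in full; the proofs are below) =====
def Claim_equal_centeredSubarrays : Prop := ∀ (nums : List Int), Dom_centeredSubarrays nums → Spec_centeredSubarrays nums (centeredSubarrays nums)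

-- ===== LEMMAS AND PROOFS =====

-- the window nums[l : l+k]
def pvWnd (nums : List Int) (l k : Nat) : List Int := (nums.drop l).take k
-- 1 if the window's sum lies in the window
def pvHit (nums : List Int) (l k : Nat) : Int :=
  if (pvWnd nums l k).sum ∈ pvWnd nums l k then 1 else 0

theorem pvWnd_succ (nums : List Int) (l k : Nat) (h : l + k < nums.length) :
    pvWnd nums l (k + 1) = pvWnd nums l k ++ [nums[l + k]] := by
  unfold pvWnd
  rw [List.take_succ]
  congr 1
  have hk : k < (nums.drop l).length := by simp; omega
  simp [List.getElem?_eq_getElem hk]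

theorem pvInnerA_spec (nums : List Int) (idx : Nat) (hidx : 2 ≤ idx) (suhe : Int)
    (hsu : suhe = (pvWnd nums 0 idx).sum) :
    ∀ (k l : Nat) (tot out : Int), nums.length + 1 - (l + idx) ≤ k →
      (l = 0 ∨ tot = (pvWnd nums (l - 1) idx).sum) →
      pvInnerA nums (l : Int) ((l : Int) + (idx : Int)) out suhe tot
        = out + ∑ j ∈ Finset.Ico l (nums.length + 1 - idx), pvHit nums j idx := by
  intro k
  induction k with
  | zero =>
    intro l tot out hk _
    have hn : ¬ ((l : Int) + (idx : Int) ≤ (nums.length : Int)) := by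
      push_cast; omega
    rw [pvInnerA, dif_neg hn, Finset.Ico_eq_empty (by omega), Finset.sum_empty, add_zero]
  | succ k ih =>
    intro l tot out hk htot
    by_cases hle : l + idx ≤ nums.length
    · have hle' : ((l : Int) + (idx : Int) ≤ (nums.length : Int)) := by push_cast; omega
      rw [pvInnerA, dif_pos hle']
      -- the incremental total equals the window sum
      have htot' : (if (l : Int) = 0 then suhe
          else tot - PySem.List.pyGetD nums ((l : Int) - 1) 0
            + PySem.List.pyGetD nums ((l : Int) + (idx : Int) - 1) 0)
          = (pvWnd nums l idx).sum := by
        by_cases hl0 : l = 0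
        · subst hl0; simpa using hsu
        · have hprev := htot.resolve_left hl0
          have hl1 : 1 ≤ l := by omega
          have hlt : ¬ ((l : Int) = 0) := by omega
          rw [if_neg hlt]
          have e1 : (l : Int) - 1 = ((l - 1 : Nat) : Int) := by push_cast [hl1]; omega
          have e2 : (l : Int) + (idx : Int) - 1 = ((l + idx - 1 : Nat) : Int) := by
            push_cast; omega
          rw [e1, e2, PySem.List.pyGetD_natCast, PySem.List.pyGetD_natCast, hprev]
          -- sum of shifted window
          have hprevw : pvWnd nums (l - 1) idx ++ [nums[l - 1 + idx]'(by omega)]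
              = nums[l - 1]'(by omega) :: pvWnd nums l idx := by
            have := pvWnd_succ nums (l - 1) idx (by omega)
            have hcons : pvWnd nums (l - 1) (idx + 1)
                = nums[l - 1]'(by omega) :: pvWnd nums l idx := by
              unfold pvWnd
              rw [List.drop_eq_getElem_cons (by omega : l - 1 < nums.length)]
              have : l - 1 + 1 = l := by omega
              simp [this]
            rw [← this, hcons]
          have hsum := congrArg List.sum hprevw
          simp only [List.sum_append, List.sum_cons, List.sum_nil] at hsum
          have g1 : nums.getD (l - 1) 0 = nums[l - 1]'(by omega) := by
            rw [List.getD_eq_getElem?_getD, List.getElem?_eq_getElem (by omega)]; rfl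
          have g2 : nums.getD (l + idx - 1) 0 = nums[l - 1 + idx]'(by omega) := by
            have : l + idx - 1 = l - 1 + idx := by omega
            rw [this, List.getD_eq_getElem?_getD, List.getElem?_eq_getElem (by omega)]; rfl
          rw [g1, g2]
          omega
      -- the slice is the window
      have hslice : PySem.List.slice nums (some (l : Int)) (some ((l : Int) + (idx : Int)))
          = pvWnd nums l idx := by
        rw [PySem.List.slice_natCast_add]; rfl
      rw [htot', hslice]
      have hcontains : (pvWnd nums l idx).contains ((pvWnd nums l idx).sum)
          = decide ((pvWnd nums l idx).sum ∈ pvWnd nums l idx) := by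
        simp
      have hcast : (l : Int) + (idx : Int) + 1 = ((l + 1 : Nat) : Int) + (idx : Int) := by
        push_cast; ring
      have hl1 : (l : Int) + 1 = ((l + 1 : Nat) : Int) := by push_cast; ring
      rw [hl1, hcast, ih (l + 1) _ _ (by omega) (Or.inr (by simp))]
      have hsplit : ∑ j ∈ Finset.Ico l (nums.length + 1 - idx), pvHit nums j idx
          = pvHit nums l idx + ∑ j ∈ Finset.Ico (l + 1) (nums.length + 1 - idx), pvHit nums j idx := by
        rw [Finset.sum_eq_sum_Ico_succ_bot (by omega : l < nums.length + 1 - idx)]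
      rw [hsplit]
      unfold pvHit
      rw [hcontains]
      simp only [decide_eq_true_eq]
      split_ifs with hmem
      · ring
      · ring
    · have hn : ¬ ((l : Int) + (idx : Int) ≤ (nums.length : Int)) := by push_cast; omega
      rw [pvInnerA, dif_neg hn, Finset.Ico_eq_empty (by omega), Finset.sum_empty, add_zero]

theorem pvOuterA_spec (nums : List Int) :
    ∀ (k idx : Nat) (out : Int), 2 ≤ idx → nums.length + 1 - idx ≤ k →
      pvOuterA nums (idx : Int) out
        = out + ∑ i ∈ Finset.Ico idx (nums.length + 1),
            ∑ j ∈ Finset.Ico 0 (nums.length + 1 - i), pvHit nums j i := by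
  intro k
  induction k with
  | zero =>
    intro idx out hidx hk
    have hn : ¬ ((idx : Int) ≤ (nums.length : Int)) := by push_cast; omega
    rw [pvOuterA, dif_neg hn, Finset.Ico_eq_empty (by omega), Finset.sum_empty, add_zero]
  | succ k ih =>
    intro idx out hidx hk
    by_cases hle : idx ≤ nums.length
    · have hle' : ((idx : Int) ≤ (nums.length : Int)) := by push_cast; omega
      rw [pvOuterA, dif_pos hle']
      have hsuhe : (PySem.List.slice nums (some 0) (some (idx : Int))).sum
          = (pvWnd nums 0 idx).sum := by
        congr 1
        rw [PySem.List.slice_zero_start, PySem.List.slice_to_natCast]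
        unfold pvWnd
        simp
      have hinner' :
          pvInnerA nums ((0 : Nat) : Int) (((0 : Nat) : Int) + (idx : Int)) out
            ((PySem.List.slice nums (some 0) (some (idx : Int))).sum) 0
          = out + ∑ j ∈ Finset.Ico 0 (nums.length + 1 - idx), pvHit nums j idx := by
        exact pvInnerA_spec nums idx hidx _ hsuhe (nums.length + 1) 0 0 out (by omega) (Or.inl rfl)
      simp only [Nat.cast_zero, zero_add] at hinner'
      have hc : (idx : Int) + 1 = ((idx + 1 : Nat) : Int) := by push_cast; ring
      show pvOuterA nums ((idx : Int) + 1)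
          (pvInnerA nums 0 (idx : Int) out ((PySem.List.slice nums (some 0) (some (idx : Int))).sum) 0)
        = _
      rw [hinner', hc, ih (idx + 1) _ (by omega) (by omega)]
      rw [Finset.sum_eq_sum_Ico_succ_bot (by omega : idx < nums.length + 1)]
      ring
    · have hn : ¬ ((idx : Int) ≤ (nums.length : Int)) := by push_cast; omega
      rw [pvOuterA, dif_neg hn, Finset.Ico_eq_empty (by omega), Finset.sum_empty, add_zero]

theorem centeredSubarrays_eq_sum (nums : List Int) :
    centeredSubarrays nums
      = (nums.length : Int) + ∑ i ∈ Finset.Ico 2 (nums.length + 1),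
          ∑ j ∈ Finset.Ico 0 (nums.length + 1 - i), pvHit nums j i := by
  unfold centeredSubarrays
  have : ((2 : Nat) : Int) = (2 : Int) := by norm_num
  rw [← this, pvOuterA_spec nums (nums.length + 1) 2 _ (by omega) (by omega)]

-- ===== B side =====

theorem pvInnerB_spec (nums : List Int) (l : Nat) (hl : l < nums.length) :
    ∀ (k r0 : Nat) (out : Int) (seen : PySem.Set Int) (s : Int),
      nums.length - r0 ≤ k → l < r0 → r0 ≤ nums.length →
      s = (pvWnd nums l (r0 - l)).sum →
      (∀ x, x ∈ seen ↔ x ∈ pvWnd nums l (r0 - l)) →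
      ((PySem.List.pyRange (r0 : Int) (nums.length : Int) 1).foldl (pvStepB nums)
          (out, seen, s)).1
        = out + ∑ j ∈ Finset.Ico r0 nums.length, pvHit nums l (j + 1 - l) := by
  intro k
  induction k with
  | zero =>
    intro r0 out seen s hk hlr hrn _ _
    have hr0 : r0 = nums.length := by omega
    subst hr0
    rw [PySem.List.pyRange_one_eq_nil (by omega)]
    simp
  | succ k ih =>
    intro r0 out seen s hk hlr hrn hs hseen
    by_cases hrlt : r0 < nums.length
    · rw [PySem.List.pyRange_one_cons (by push_cast; omega), List.foldl_cons]
      have hy : PySem.List.pyGetD nums (r0 : Int) 0 = nums[r0] := by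
        rw [PySem.List.pyGetD_natCast, List.getD_eq_getElem?_getD,
          List.getElem?_eq_getElem hrlt]; rfl
      have hwin : pvWnd nums l (r0 + 1 - l) = pvWnd nums l (r0 - l) ++ [nums[r0]] := by
        have h1 : r0 + 1 - l = (r0 - l) + 1 := by omega
        have h2 := pvWnd_succ nums l (r0 - l) (by omega)
        have h3 : l + (r0 - l) = r0 := by omega
        rw [h1, h2]
        congr 1
        simp [h3]
      have hs' : s + PySem.List.pyGetD nums (r0 : Int) 0
          = (pvWnd nums l (r0 + 1 - l)).sum := by
        rw [hy, hwin, hs]; simp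
      have hseen' : ∀ x, x ∈ PySem.Set.add seen (PySem.List.pyGetD nums (r0 : Int) 0)
          ↔ x ∈ pvWnd nums l (r0 + 1 - l) := by
        intro x
        rw [hy, PySem.Set.mem_add, hwin, List.mem_append, hseen x]
        simp
      have hcont : PySem.Set.contains (PySem.Set.add seen (PySem.List.pyGetD nums (r0 : Int) 0))
            (s + PySem.List.pyGetD nums (r0 : Int) 0)
          = decide ((pvWnd nums l (r0 + 1 - l)).sum ∈ pvWnd nums l (r0 + 1 - l)) := by
        rw [← hs']
        have hiff := (PySem.Set.contains_iff (PySem.Set.add seen (PySem.List.pyGetD nums (r0 : Int) 0))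
          (s + PySem.List.pyGetD nums (r0 : Int) 0)).trans (hseen' _)
        by_cases hm : s + PySem.List.pyGetD nums (r0 : Int) 0 ∈ pvWnd nums l (r0 + 1 - l)
        · rw [decide_eq_true hm]; exact hiff.mpr hm
        · rw [decide_eq_false hm]
          cases hb : PySem.Set.contains (PySem.Set.add seen (PySem.List.pyGetD nums (r0 : Int) 0))
              (s + PySem.List.pyGetD nums (r0 : Int) 0)
          · rfl
          · exact absurd (hiff.mp hb) hm
      have hcast : (r0 : Int) + 1 = ((r0 + 1 : Nat) : Int) := by push_cast; ring
      show ((PySem.List.pyRange ((r0 : Int) + 1) (nums.length : Int) 1).foldl _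
          ((if PySem.Set.contains (PySem.Set.add seen (PySem.List.pyGetD nums (r0 : Int) 0))
              (s + PySem.List.pyGetD nums (r0 : Int) 0) then out + 1 else out),
            PySem.Set.add seen (PySem.List.pyGetD nums (r0 : Int) 0),
            s + PySem.List.pyGetD nums (r0 : Int) 0)).1 = _
      rw [hcast, ih (r0 + 1) _ _ _ (by omega) (by omega) (by omega) hs' hseen']
      rw [Finset.sum_eq_sum_Ico_succ_bot (by omega : r0 < nums.length)]
      rw [hcont]
      unfold pvHit
      simp only [decide_eq_true_eq]
      split_ifs with hm
      · ring
      · ring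
    · have hr0 : r0 = nums.length := by omega
      subst hr0
      rw [PySem.List.pyRange_one_eq_nil (by omega)]
      simp

theorem pvOuterB_spec (nums : List Int) :
    ∀ (k l0 : Nat) (out : Int), nums.length - l0 ≤ k → l0 ≤ nums.length →
      (PySem.List.pyRange (l0 : Int) (nums.length : Int) 1).foldl (pvBodyB nums) out
      = out + ∑ i ∈ Finset.Ico l0 nums.length,
          ∑ j ∈ Finset.Ico (i + 1) nums.length, pvHit nums i (j + 1 - i) := by
  intro k
  induction k with
  | zero =>
    intro l0 out hk hln
    have h0 : l0 = nums.length := by omega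
    subst h0
    rw [PySem.List.pyRange_one_eq_nil (by omega)]
    simp
  | succ k ih =>
    intro l0 out hk hln
    by_cases hlt : l0 < nums.length
    · rw [PySem.List.pyRange_one_cons (by push_cast; omega), List.foldl_cons]
      have hx : PySem.List.pyGetD nums (l0 : Int) 0 = nums[l0] := by
        rw [PySem.List.pyGetD_natCast, List.getD_eq_getElem?_getD,
          List.getElem?_eq_getElem hlt]; rfl
      have hw1 : pvWnd nums l0 1 = [nums[l0]] := by
        unfold pvWnd
        rw [List.drop_eq_getElem_cons hlt, List.take_succ_cons, List.take_zero]
      have hcast : (l0 : Int) + 1 = ((l0 + 1 : Nat) : Int) := by push_cast; ring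
      have hinner := pvInnerB_spec nums l0 hlt (nums.length) (l0 + 1) out
        (PySem.Set.ofList [PySem.List.pyGetD nums (l0 : Int) 0])
        (PySem.List.pyGetD nums (l0 : Int) 0)
        (by omega) (by omega) (by omega)
        (by rw [hx]; simp [hw1])
        (by
          intro x
          rw [PySem.Set.mem_ofList, hx]
          simp [hw1])
      rw [← hcast] at hinner
      have hbody : pvBodyB nums out (l0 : Int)
          = out + ∑ j ∈ Finset.Ico (l0 + 1) nums.length, pvHit nums l0 (j + 1 - l0) := by
        unfold pvBodyB
        exact hinner
      rw [hbody, hcast, ih (l0 + 1) _ (by omega) (by omega)]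
      rw [Finset.sum_eq_sum_Ico_succ_bot (by omega : l0 < nums.length)]
      ring
    · have h0 : l0 = nums.length := by omega
      subst h0
      rw [PySem.List.pyRange_one_eq_nil (by omega)]
      simp

theorem centeredSubarrays_alt_eq_sum (nums : List Int) :
    centeredSubarrays_alt nums
      = (nums.length : Int) + ∑ i ∈ Finset.Ico 0 nums.length,
          ∑ j ∈ Finset.Ico (i + 1) nums.length, pvHit nums i (j + 1 - i) := by
  have h := pvOuterB_spec nums (nums.length) 0 (nums.length : Int) (by omega) (by omega)
  simp only [Nat.cast_zero] at h
  exact h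

theorem pvSum_reindex (nums : List Int) :
    (∑ i ∈ Finset.Ico 2 (nums.length + 1),
        ∑ j ∈ Finset.Ico 0 (nums.length + 1 - i), pvHit nums j i)
      = ∑ i ∈ Finset.Ico 0 nums.length,
          ∑ j ∈ Finset.Ico (i + 1) nums.length, pvHit nums i (j + 1 - i) := by
  rw [Finset.sum_sigma' (Finset.Ico 2 (nums.length + 1))
        (fun i => Finset.Ico 0 (nums.length + 1 - i)) (fun i j => pvHit nums j i),
      Finset.sum_sigma' (Finset.Ico 0 nums.length)
        (fun i => Finset.Ico (i + 1) nums.length) (fun i j => pvHit nums i (j + 1 - i))]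
  refine Finset.sum_nbij' (fun p => ⟨p.2, p.2 + p.1 - 1⟩) (fun q => ⟨q.2 + 1 - q.1, q.1⟩)
    ?_ ?_ ?_ ?_ ?_
  · intro p hp
    simp only [Finset.mem_sigma, Finset.mem_Ico] at hp ⊢
    omega
  · intro q hq
    simp only [Finset.mem_sigma, Finset.mem_Ico] at hq ⊢
    omega
  · intro p hp
    simp only [Finset.mem_sigma, Finset.mem_Ico] at hp
    have h1 : p.2 + p.1 - 1 + 1 - p.2 = p.1 := by omega
    simp [h1]
  · intro q hq
    simp only [Finset.mem_sigma, Finset.mem_Ico] at hq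
    have h1 : q.1 + (q.2 + 1 - q.1) - 1 = q.2 := by omega
    simp [h1]
  · intro p hp
    simp only [Finset.mem_sigma, Finset.mem_Ico] at hp
    have h1 : p.2 + p.1 - 1 + 1 - p.2 = p.1 := by omega
    simp [h1]

-- ===== VERDICT (by name: the statement is the Claim_ definition above) =====
theorem centeredSubarrays_spec : Claim_equal_centeredSubarrays := by
  intro nums _
  unfold Spec_centeredSubarrays
  rw [centeredSubarrays_eq_sum, centeredSubarrays_alt_eq_sum, pvSum_reindex]
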